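-- pv_equiv track=rewrite | github.com/acstanton/HIV-barcodes | prelim_barcoded_lenti_031319.py | discard_internal_mm
-- ===== SOURCE A (Python) =====
-- import itertools
--
-- def hamming(s1, s2):
-- ######################################################################################
-- #                                                                                    #
-- # Takes two sequences and computes the Hamming distance between them.                #
-- #                                                                                    #
-- # Inputs:                                                                            #
-- #      s1, s2: two DNA sequences of equal length                                     #
-- # Outputs:                                                                           #
-- #      dist: an integer representing the hamming distance                            #
-- #                                                                                    #
-- ######################################################################################
--
--     if isinstance(s1, str) == 0:
--         s1 = str(s1)
--     if isinstance(s2, str) == 0: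
--         s2 = str(s2)
--
--     s1 = list(s1)
--     s2 = list(s2)
--
--     dist = len([i for i, j in zip(s1, s2) if i != j and i != 'N' and j != 'N'])
--
--     return dist
--
-- def discard_internal_mm(seqs_concat):
-- ######################################################################################
-- #                                                                                    #
-- # Checks to make sure that all sequences within a group are identical and saves      #
-- #   sequences from such valid groups.                                                #
-- #                                                                                    #
-- # Inputs:                                                                            #
-- #      seqs_concat: a list of sublists where each sublist contains all of the        #
-- #        sequences in a barcode group (list of flattened sublists of strings). Each  #
-- #        string corresponds to one read pair.                                        #
-- # Outputs:                                                                           #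
-- #      true_seqs: a list of sequences where each sequence corresponds one-to-one     #
-- #        with a barcode group. List of strings.                                      #
-- #                                                                                    #
-- ######################################################################################
--
--     num_mismatched = 0
--     true_seqs = []
--
--     for group in seqs_concat:
--         counter = 0
--         combos = list(itertools.combinations(group, 2))
--
--         for pair in combos:
--             counter += hamming(pair[0], pair[1])
--
--         if counter > 0:
--             num_mismatched += 1
--         else:
--             true_seqs.append(group[0])
--
--     return true_seqs
-- ===== SOURCE B (Python) =====
-- def discard_internal_mm(seqs_concat):
--     # Position-wise check: a group is clean iff at every position the
--     # non-'N' characters of all its sequences (that reach that position)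
--     # are identical -- one O(k*L) pass instead of all O(k^2) pairs.
--     true_seqs = []
--     for group in seqs_concat:
--         longest = max(len(s) for s in group)
--         ok = True
--         for p in range(longest):
--             seen = None
--             for s in group:
--                 if p < len(s):
--                     c = s[p]
--                     if c != 'N':
--                         if seen is None:
--                             seen = c
--                         elif seen != c:
--                             ok = False
--                             break
--             if not ok:
--                 break
--         if ok:
--             true_seqs.append(group[0])
--     return true_seqs
-- ===== Notes on version B (the rewrite author's own statement) =====
-- stated objective: faster
-- what changed: Replaces the all-pairs Hamming-distance sum (itertools.combinations, O(k^2*L) per group) with a single position-wise scan that checks whether more than one distinct non-'N' character occurs at any position (O(k*L) per group).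
import Mathlib
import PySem

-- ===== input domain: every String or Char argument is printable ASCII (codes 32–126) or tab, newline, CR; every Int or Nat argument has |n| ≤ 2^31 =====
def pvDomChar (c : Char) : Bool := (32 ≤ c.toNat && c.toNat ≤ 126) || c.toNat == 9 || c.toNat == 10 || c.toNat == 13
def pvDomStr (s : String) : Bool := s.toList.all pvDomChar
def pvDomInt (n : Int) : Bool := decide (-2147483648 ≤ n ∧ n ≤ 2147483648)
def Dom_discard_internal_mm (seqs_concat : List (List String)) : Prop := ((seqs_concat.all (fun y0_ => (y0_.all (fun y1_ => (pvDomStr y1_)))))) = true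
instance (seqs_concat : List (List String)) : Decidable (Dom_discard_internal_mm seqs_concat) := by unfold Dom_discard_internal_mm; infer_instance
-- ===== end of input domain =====

-- B replaces A's all-pairs Hamming-distance sum per group by a single position-wise
-- scan for a second distinct non-'N' character; equivalence proved on groups that are nonempty.


-- ===== PORT A =====
-- hamming: len([.. for i,j in zip(s1,s2) if i != j and i != 'N' and j != 'N'])
-- (the isinstance/str() coercions are no-ops on str inputs)
def pyHamming (s1 s2 : String) : Int :=
  (((s1.toList.zip s2.toList).filter
      (fun ij => ij.1 != ij.2 && ij.1 != 'N' && ij.2 != 'N')).length : Int)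

-- list(itertools.combinations(group, 2))
def pyCombos2 : List String → List (String × String)
  | [] => []
  | x :: xs => xs.map (fun y => (x, y)) ++ pyCombos2 xs

def discard_internal_mm (seqs_concat : List (List String)) : List String :=
  (seqs_concat.foldl
    (fun (st : Int × List String) group =>
      let counter := (pyCombos2 group).foldl (fun c pair => c + pyHamming pair.1 pair.2) 0
      if counter > 0 then (st.1 + 1, st.2)
      else (st.1, st.2 ++ [(PySem.List.pyGet? group 0).getD ""]))  -- group[0]; Pre_ keeps groups nonempty
    (0, [])).2

-- ===== PORT B =====
-- B's inner loop over the group's sequences at position p (break = return false)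
def scanPos : List String → Nat → Option Char → Bool
  | [], _, _ => true
  | s :: rest, p, seen =>
    match s.toList[p]? with
    | none => scanPos rest p seen
    | some c =>
      if c = 'N' then scanPos rest p seen
      else
        match seen with
        | none => scanPos rest p (some c)
        | some d => if d = c then scanPos rest p seen else false

def discard_internal_mm_alt (seqs_concat : List (List String)) : List String :=
  seqs_concat.foldl
    (fun acc group =>
      let longest := group.foldl (fun m s => max m s.toList.length) 0
      if (List.range longest).all (fun p => scanPos group p none)
      then acc ++ [group.headD ""] else acc)   -- group[0]; Pre_ keeps groups nonempty
    []

-- ===== PRECONDITION & SPEC =====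
-- Pre_ excludes inputs containing an empty group: there Python A raises IndexError
-- at group[0] (and Python B raises ValueError at max()).
def Pre_discard_internal_mm (seqs_concat : List (List String)) : Prop :=
  ∀ g ∈ seqs_concat, g ≠ []
instance (seqs_concat : List (List String)) : Decidable (Pre_discard_internal_mm seqs_concat) := by
  unfold Pre_discard_internal_mm; infer_instance
def pvWitness_discard_internal_mm : List (List String) :=
  [["ACN", "ANT", "NCT"], ["AG", "TG"], ["C"]]
def Spec_discard_internal_mm (seqs_concat : List (List String)) (out : List String) : Prop := out = discard_internal_mm_alt seqs_concat
instance (seqs_concat : List (List String)) (out : List String) : Decidable (Spec_discard_internal_mm seqs_concat out) := by unfold Spec_discard_internal_mm; infer_instance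

-- ===== CLAIM (what is proved, stated in full; the proofs are below) =====
def Claim_equal_discard_internal_mm : Prop := ∀ (seqs_concat : List (List String)), Dom_discard_internal_mm seqs_concat → Pre_discard_internal_mm seqs_concat → Spec_discard_internal_mm seqs_concat (discard_internal_mm seqs_concat)

-- ===== LEMMAS AND PROOFS =====

-- the non-'N' characters found at position p among the group's sequences
def charsAt (group : List String) (p : Nat) : List Char :=
  (group.filterMap (fun s => s.toList[p]?)).filter (fun c => c ≠ 'N')

-- "these two sequences have no counted mismatch", position by position
def Compat (s t : String) : Prop :=
  ∀ (p : Nat) (c d : Char), s.toList[p]? = some c → t.toList[p]? = some d → c ≠ 'N' → d ≠ 'N' → c = d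

lemma mem_zip_iff (l1 l2 : List Char) (x : Char × Char) :
    x ∈ l1.zip l2 ↔ ∃ (i : Nat), l1[i]? = some x.1 ∧ l2[i]? = some x.2 := by
  constructor
  · intro h
    obtain ⟨i, hi, hx⟩ := List.mem_iff_getElem.1 h
    refine ⟨i, ?_, ?_⟩ <;> rw [← hx] <;>
      simp [List.getElem_zip,
        (List.lt_length_left_of_zip hi), (List.lt_length_right_of_zip hi)]
  · rintro ⟨i, h1, h2⟩
    obtain ⟨hi1, e1⟩ := List.getElem?_eq_some_iff.1 h1
    obtain ⟨hi2, e2⟩ := List.getElem?_eq_some_iff.1 h2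
    have hz : i < (l1.zip l2).length := by simp [List.length_zip]; omega
    have : (l1.zip l2)[i] = x := by rw [List.getElem_zip]; rw [e1, e2]
    exact this ▸ List.getElem_mem hz

lemma pyHamming_eq_zero_iff (s t : String) : pyHamming s t = 0 ↔ Compat s t := by
  rw [pyHamming]
  rw [show ((((s.toList.zip t.toList).filter
      (fun ij => ij.1 != ij.2 && ij.1 != 'N' && ij.2 != 'N')).length : Int) = 0
      ↔ ∀ ij ∈ s.toList.zip t.toList, ¬(ij.1 != ij.2 && ij.1 != 'N' && ij.2 != 'N') = true) by
    simp [List.filter_eq_nil_iff]]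
  constructor
  · intro h p c d hc hd hcN hdN
    have := h (c, d) (by rw [mem_zip_iff]; exact ⟨p, hc, hd⟩)
    simpa [hcN, hdN] using this
  · intro h ij hij
    obtain ⟨i, h1, h2⟩ := (mem_zip_iff _ _ _).1 hij
    by_cases hN1 : ij.1 = 'N' <;> by_cases hN2 : ij.2 = 'N' <;> simp [hN1, hN2]
    exact h i ij.1 ij.2 h1 h2 hN1 hN2

lemma sum_map_le_zero_iff {α : Type} (l : List α) (f : α → Int) (hf : ∀ x, 0 ≤ f x) :
    (l.map f).sum ≤ 0 ↔ ∀ x ∈ l, f x = 0 := by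
  induction l with
  | nil => simp
  | cons a l ih =>
    have ht : 0 ≤ (l.map f).sum := List.sum_nonneg (by simpa using fun x _ => hf x)
    have ha := hf a
    simp only [List.map_cons, List.sum_cons, List.mem_cons]
    constructor
    · intro h
      have hfa : f a = 0 := by omega
      have : (l.map f).sum ≤ 0 := by omega
      exact fun x hx => hx.elim (fun e => e ▸ hfa) (ih.1 this x)
    · intro h
      have hfa : f a = 0 := h a (Or.inl rfl)
      have : (l.map f).sum ≤ 0 := ih.2 (fun x hx => h x (Or.inr hx))
      omega

lemma combos2_forall (g : List String) :
    ((pyCombos2 g).foldl (fun c pair => c + pyHamming pair.1 pair.2) 0 ≤ 0)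
      ↔ List.Pairwise Compat g := by
  rw [PySem.List.foldl_add, zero_add]
  rw [sum_map_le_zero_iff _ _ (fun x => by simp [pyHamming])]
  induction g with
  | nil => simp [pyCombos2]
  | cons a l ih =>
    simp only [pyCombos2, List.mem_append, List.mem_map, List.pairwise_cons, ← ih]
    constructor
    · intro h
      refine ⟨fun t ht => (pyHamming_eq_zero_iff a t).1 (h (a,t) (Or.inl ⟨t, ht, rfl⟩)), ?_⟩
      exact fun pr hpr => h pr (Or.inr hpr)
    · rintro ⟨h1, h2⟩ pr hpr
      rcases hpr with ⟨t, ht, rfl⟩ | hpr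
      · exact (pyHamming_eq_zero_iff a t).2 (h1 t ht)
      · exact h2 pr hpr

lemma scanPos_some (g : List String) (p : Nat) (d : Char) :
    scanPos g p (some d) = true ↔ ∀ c ∈ charsAt g p, c = d := by
  induction g generalizing d with
  | nil => simp [scanPos, charsAt]
  | cons s rest ih =>
    simp only [scanPos]
    cases h : s.toList[p]? with
    | none => simp [charsAt, h] at ih ⊢; exact ih d
    | some c =>
      by_cases hN : c = 'N'
      · subst hN; simp [charsAt, h] at ih ⊢; exact ih d
      · have hch : charsAt (s :: rest) p = c :: charsAt rest p := by
          simp [charsAt, h, hN]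
        simp only [hN, if_false, hch, List.mem_cons]
        by_cases hdc : d = c
        · subst hdc
          rw [if_pos rfl, ih]
          constructor
          · intro hall x hx
            rcases hx with rfl | hx
            · rfl
            · exact hall x hx
          · intro hall x hx; exact hall x (Or.inr hx)
        · rw [if_neg hdc]
          constructor
          · intro hF; cases hF
          · intro h'; exact absurd (h' c (Or.inl rfl)).symm hdc

lemma scanPos_none (g : List String) (p : Nat) :
    scanPos g p none = true ↔ ∀ c ∈ charsAt g p, ∀ d ∈ charsAt g p, c = d := by
  induction g with
  | nil => simp [scanPos, charsAt]
  | cons s rest ih =>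
    simp only [scanPos]
    cases h : s.toList[p]? with
    | none => simpa [charsAt, h] using ih
    | some c =>
      by_cases hN : c = 'N'
      · subst hN; simpa [charsAt, h] using ih
      · simp only [hN, if_false]
        rw [scanPos_some]
        have hch : charsAt (s :: rest) p = c :: charsAt rest p := by
          simp [charsAt, h, hN]
        rw [hch]
        constructor
        · intro hall x hx y hy
          rcases List.mem_cons.1 hx with hx' | hx' <;>
            rcases List.mem_cons.1 hy with hy' | hy'
          · rw [hx', hy']
          · rw [hx', (hall y hy').symm]
          · rw [hy', hall x hx']
          · rw [hall x hx', hall y hy']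
        · intro hall x hx
          exact hall x (List.mem_cons_of_mem _ hx) c (List.mem_cons_self ..)

lemma mem_charsAt (g : List String) (p : Nat) (c : Char) :
    c ∈ charsAt g p ↔ (∃ s ∈ g, s.toList[p]? = some c) ∧ c ≠ 'N' := by
  simp [charsAt, List.mem_filter, List.mem_filterMap]

lemma pairwise_iff_allSame (g : List String) :
    List.Pairwise Compat g ↔ ∀ p, ∀ c ∈ charsAt g p, ∀ d ∈ charsAt g p, c = d := by
  constructor
  · intro hpw p c hc d hd
    obtain ⟨⟨s, hs, hsc⟩, hcN⟩ := (mem_charsAt g p c).1 hc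
    obtain ⟨⟨t, ht, htd⟩, hdN⟩ := (mem_charsAt g p d).1 hd
    obtain ⟨i, hi, rfl⟩ := List.mem_iff_getElem.1 hs
    obtain ⟨j, hj, rfl⟩ := List.mem_iff_getElem.1 ht
    rcases lt_trichotomy i j with hij | hij | hij
    · exact (List.pairwise_iff_getElem.1 hpw i j hi hj hij) p c d hsc htd hcN hdN
    · subst hij
      rw [hsc] at htd; exact (Option.some_inj.1 htd)
    · exact ((List.pairwise_iff_getElem.1 hpw j i hj hi hij) p d c htd hsc hdN hcN).symm
  · intro hall
    rw [List.pairwise_iff_getElem]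
    intro i j hi hj hij p c d hc hd hcN hdN
    exact hall p c ((mem_charsAt g p c).2 ⟨⟨_, List.getElem_mem hi, hc⟩, hcN⟩)
      d ((mem_charsAt g p d).2 ⟨⟨_, List.getElem_mem hj, hd⟩, hdN⟩)

-- A's per-group test (some pair has a counted mismatch) is the negation of B's per-group test
lemma group_cond (g : List String) :
    ((pyCombos2 g).foldl (fun c pair => c + pyHamming pair.1 pair.2) 0 > 0)
      = ¬ ((List.range (g.foldl (fun m s => max m s.toList.length) 0)).all
            (fun p => scanPos g p none) = true) := by
  have hL : ∀ s ∈ g, s.toList.length ≤ g.foldl (fun m s => max m s.toList.length) 0 := by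
    intro s hs
    have := (PySem.List.le_foldl_max (g.map (fun t => t.toList.length)) 0).2
      _ (List.mem_map_of_mem (f := fun t => t.toList.length) hs)
    rwa [List.foldl_map] at this
  have key : List.Pairwise Compat g ↔
      ∀ p ∈ List.range (g.foldl (fun m s => max m s.toList.length) 0), scanPos g p none = true := by
    rw [pairwise_iff_allSame]
    constructor
    · intro h p _
      exact (scanPos_none g p).2 (h p)
    · intro h p
      by_cases hp : p < g.foldl (fun m s => max m s.toList.length) 0
      · exact (scanPos_none g p).1 (h p (List.mem_range.2 hp))
      · intro c hc
        obtain ⟨⟨s, hs, hsc⟩, _⟩ := (mem_charsAt g p c).1 hc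
        obtain ⟨hlt, -⟩ := List.getElem?_eq_some_iff.1 hsc
        have := hL s hs
        omega
  have : ((pyCombos2 g).foldl (fun c pair => c + pyHamming pair.1 pair.2) 0 > 0)
      ↔ ¬ ((pyCombos2 g).foldl (fun c pair => c + pyHamming pair.1 pair.2) 0 ≤ 0) := by omega
  rw [eq_iff_iff, this, combos2_forall, key, not_iff_not, List.all_eq_true]

lemma head_eq (g : List String) (h : g ≠ []) :
    (PySem.List.pyGet? g 0).getD "" = g.headD "" := by
  cases g with
  | nil => exact absurd rfl h
  | cons a t => simp

lemma fold_eq (l : List (List String)) : ∀ (st : Int × List String),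
    (∀ g ∈ l, g ≠ []) →
    (l.foldl (fun (st : Int × List String) group =>
        let counter := (pyCombos2 group).foldl (fun c pair => c + pyHamming pair.1 pair.2) 0
        if counter > 0 then (st.1 + 1, st.2)
        else (st.1, st.2 ++ [(PySem.List.pyGet? group 0).getD ""])) st).2
      = l.foldl (fun acc group =>
        let longest := group.foldl (fun m s => max m s.toList.length) 0
        if (List.range longest).all (fun p => scanPos group p none)
        then acc ++ [group.headD ""] else acc) st.2 := by
  induction l with
  | nil => intro st _; rfl
  | cons g l ih =>
    intro st h
    have hgne := h g (List.mem_cons_self ..)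
    have hrest : ∀ x ∈ l, x ≠ [] := fun x hx => h x (List.mem_cons_of_mem _ hx)
    simp only [List.foldl_cons]
    rw [ih _ hrest]
    congr 1
    by_cases hB : (List.range (g.foldl (fun m s => max m s.toList.length) 0)).all
        (fun p => scanPos g p none) = true
    · have hA : ¬((pyCombos2 g).foldl (fun c pair => c + pyHamming pair.1 pair.2) 0 > 0) := by
        rw [group_cond]; exact not_not_intro hB
      simp only [if_neg hA, if_pos hB, head_eq g hgne]
    · have hA : ((pyCombos2 g).foldl (fun c pair => c + pyHamming pair.1 pair.2) 0 > 0) := by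
        rw [group_cond]; exact hB
      simp only [if_pos hA, if_neg hB]

-- ===== VERDICT (by name: the statement is the Claim_ definition above) =====
theorem discard_internal_mm_spec : Claim_equal_discard_internal_mm := by
  intro seqs _ hpre
  unfold Spec_discard_internal_mm discard_internal_mm discard_internal_mm_alt
  exact fold_eq seqs (0, []) hpre
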